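-- pv_equiv track=rewrite | github.com/tomhero916/text-to-mp3 | tts_providers.py | _force_break_long
-- ===== SOURCE A (Python) =====
-- def _force_break_long(text: str, max_len: int) -> str:
--     """
--     長文を強制分割する。スペースがあればスペースで、
--     なければ文字数で切り、各セグメント間に句点を挿入する。
--     """
--     if ' ' in text:
--         words = text.split(' ')
--         segments = []
--         current = ''
--         for w in words:
--             candidate = (current + ' ' + w) if current else w
--             if len(candidate) <= max_len:
--                 current = candidate
--             else:
--                 if current:
--                     segments.append(current)
--                 current = w
--         if current:
--             segments.append(current)
--         final = []
--         for seg in segments: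
--             if len(seg) > max_len:
--                 final.extend(_char_split(seg, max_len))
--             else:
--                 final.append(seg)
--         return chr(0x3002).join(final)
--     return chr(0x3002).join(_char_split(text, max_len))
--
-- def _char_split(text: str, max_len: int) -> list:
--     """文字数で強制分割する最終手段。"""
--     return [text[i:i + max_len] for i in range(0, len(text), max_len)]
-- ===== SOURCE B (Python) =====
-- def _force_break_long(text: str, max_len: int) -> str:
--     """Arithmetic variant: instead of growing a string word by word, compute each
--     break point by length arithmetic on the word list and join whole slices."""
--     if ' ' not in text:
--         return chr(0x3002).join(_char_split(text, max_len))
--     return chr(0x3002).join(_segments(text.split(' '), max_len))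
--
--
-- def _segments(words, max_len):
--     # empty words at a run start never contribute anything
--     while words and not words[0]:
--         words = words[1:]
--     if not words:
--         return []
--     # greedy break point: longest prefix (first word unconditional) whose joined length fits
--     j, length = 1, len(words[0])
--     while j < len(words) and length + 1 + len(words[j]) <= max_len:
--         length += 1 + len(words[j])
--         j += 1
--     seg = ' '.join(words[:j])
--     head = [seg] if length <= max_len else _char_split(seg, max_len)
--     return head + _segments(words[j:], max_len)
--
--
-- def _char_split(text: str, max_len: int) -> list:
--     return [text[i:i + max_len] for i in range(0, len(text), max_len)]
-- ===== Notes on version B (the rewrite author's own statement) =====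
-- stated objective: alternative
-- what changed: B replaces A's accumulator string machine (grow `current` word by word, collect segments, then a second pass char-splitting over-long ones) by a recursive break-point computation: it finds each greedy break index by pure length arithmetic on the word list, joins whole slices, and emits each piece immediately.
import Mathlib
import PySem

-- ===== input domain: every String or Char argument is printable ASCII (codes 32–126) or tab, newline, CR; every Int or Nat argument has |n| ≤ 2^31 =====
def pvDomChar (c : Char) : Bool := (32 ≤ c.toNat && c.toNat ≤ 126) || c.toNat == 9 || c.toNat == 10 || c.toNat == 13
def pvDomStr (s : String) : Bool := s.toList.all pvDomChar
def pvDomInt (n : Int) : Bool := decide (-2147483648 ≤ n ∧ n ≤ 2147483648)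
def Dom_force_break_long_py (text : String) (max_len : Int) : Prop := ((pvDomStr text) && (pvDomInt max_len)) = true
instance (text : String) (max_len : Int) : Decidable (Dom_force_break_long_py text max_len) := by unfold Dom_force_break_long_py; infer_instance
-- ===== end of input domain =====

-- B replaces A's accumulator string machine (grow `current` word by word, then a second
-- post-processing pass) by a recursive break-point computation: each greedy break index is
-- found by length arithmetic on the word list and whole slices are joined; alternative, same cost.


-- ===== PORT A =====
-- _char_split(text, max_len): [text[i:i+max_len] for i in range(0, len(text), max_len)]
-- (both Python files define this helper with identical code, so both ports share it)
def pyCharSplit (cs : List Char) (max_len : Int) : List (List Char) :=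
  (PySem.List.pyRange 0 (PySem.List.len cs) max_len).map
    (fun i => PySem.List.slice cs (some i) (some (i + max_len)))

def force_break_long_py (text : String) (max_len : Int) : String :=
  let cs := text.toList
  if PySem.Chars.isIn [' '] cs then
    let words := PySem.Chars.splitOn cs [' ']
    let st := words.foldl
      (fun (st : List (List Char) × List Char) w =>
        let segments := st.1
        let current := st.2
        let candidate := if current ≠ [] then current ++ [' '] ++ w else w
        if (candidate.length : Int) ≤ max_len then (segments, candidate)
        else ((if current ≠ [] then segments ++ [current] else segments), w))
      ([], [])
    let segments := if st.2 ≠ [] then st.1 ++ [st.2] else st.1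
    let final := segments.foldl
      (fun acc seg =>
        if (seg.length : Int) > max_len then acc ++ pyCharSplit seg max_len
        else acc ++ [seg]) []
    String.ofList (PySem.Chars.join ['。'] final)
  else
    String.ofList (PySem.Chars.join ['。'] (pyCharSplit cs max_len))

-- ===== PORT B =====
-- the inner while loop of _segments: greedily extend the run, tracking (extra words taken, joined length)
def pyGrow (max_len : Int) (length : Int) : List (List Char) → Nat × Int
  | [] => (0, length)
  | w :: ws =>
      if length + 1 + (w.length : Int) ≤ max_len then
        let r := pyGrow max_len (length + 1 + (w.length : Int)) ws
        (r.1 + 1, r.2)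
      else (0, length)

-- _segments(words, max_len): skip leading empty words, compute the greedy break point by
-- length arithmetic, join the slice, emit it (char-split when over-long), recurse on the rest
def pySegs (max_len : Int) : List (List Char) → List (List Char)
  | [] => []
  | [] :: ws => pySegs max_len ws
  | (c :: w) :: ws =>
      let r := pyGrow max_len (((c :: w).length : Int)) ws
      let seg := PySem.Chars.join [' '] ((c :: w) :: ws.take r.1)
      (if r.2 ≤ max_len then [seg] else pyCharSplit seg max_len) ++ pySegs max_len (ws.drop r.1)
  termination_by ws => ws.length
  decreasing_by all_goals simp [List.length_drop]

def force_break_long_py_alt (text : String) (max_len : Int) : String :=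
  let cs := text.toList
  if PySem.Chars.isIn [' '] cs = false then
    String.ofList (PySem.Chars.join ['。'] (pyCharSplit cs max_len))
  else
    String.ofList (PySem.Chars.join ['。'] (pySegs max_len (PySem.Chars.splitOn cs [' '])))

-- ===== PRECONDITION & SPEC =====
-- Pre_ excludes exactly the inputs where A raises: with max_len = 0, range(0, n, 0)
-- raises ValueError whenever _char_split is reached, i.e. unless the text is nonempty
-- and consists only of spaces (there A returns '' and those inputs stay inside Pre_).
def Pre_force_break_long_py (text : String) (max_len : Int) : Prop :=
  max_len ≠ 0 ∨ (text.toList ≠ [] ∧ text.toList.all (· = ' ') = true)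
instance (text : String) (max_len : Int) : Decidable (Pre_force_break_long_py text max_len) := by
  unfold Pre_force_break_long_py; infer_instance

def pvWitness_force_break_long_py : String × Int := ("hello world this is a test", 5)

def Spec_force_break_long_py (text : String) (max_len : Int) (out : String) : Prop := out = force_break_long_py_alt text max_len
instance (text : String) (max_len : Int) (out : String) : Decidable (Spec_force_break_long_py text max_len out) := by unfold Spec_force_break_long_py; infer_instance

-- ===== CLAIM (what is proved, stated in full; the proofs are below) =====
def Claim_equal_force_break_long_py : Prop := ∀ (text : String) (max_len : Int), Dom_force_break_long_py text max_len → Pre_force_break_long_py text max_len → Spec_force_break_long_py text max_len (force_break_long_py text max_len)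

-- ===== LEMMAS AND PROOFS =====

-- joining a run whose head already carries a glued word
lemma pvJoinGlue (cur w : List Char) (l : List (List Char)) :
    PySem.Chars.join [' '] ((cur ++ [' '] ++ w) :: l)
      = cur ++ [' '] ++ PySem.Chars.join [' '] (w :: l) := by
  cases l with
  | nil => simp [PySem.Chars.join_singleton]
  | cons b l' => simp [PySem.Chars.join_cons_cons, List.append_assoc]

-- how A's second pass treats one segment
def pvProc (max_len : Int) (seg : List Char) : List (List Char) :=
  if (seg.length : Int) ≤ max_len then [seg] else pyCharSplit seg max_len

-- A's second pass is flatMap of pvProc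
lemma pvSecondPass (max_len : Int) (segs : List (List Char)) :
    segs.foldl
      (fun acc seg =>
        if (seg.length : Int) > max_len then acc ++ pyCharSplit seg max_len
        else acc ++ [seg]) []
      = segs.flatMap (pvProc max_len) := by
  have hfun : segs.foldl
      (fun acc seg =>
        if (seg.length : Int) > max_len then acc ++ pyCharSplit seg max_len
        else acc ++ [seg]) []
      = segs.foldl (fun acc seg => acc ++ pvProc max_len seg) [] := by
    congr 1
    funext acc seg
    by_cases hl : (seg.length : Int) ≤ max_len
    · rw [if_neg (by omega), pvProc, if_pos hl]
    · rw [if_pos (by omega), pvProc, if_neg hl]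
  rw [hfun, PySem.List.foldl_append_eq_flatMap]
  simp

-- recursive form of A's first pass including the trailing flush
def segA (max_len : Int) : List (List Char) → List Char → List (List Char)
  | [], cur => if cur ≠ [] then [cur] else []
  | w :: ws, cur =>
      let cand := if cur ≠ [] then cur ++ [' '] ++ w else w
      if (cand.length : Int) ≤ max_len then segA max_len ws cand
      else (if cur ≠ [] then [cur] else []) ++ segA max_len ws w

lemma pvFoldA (max_len : Int) (ws : List (List Char)) :
    ∀ (segs : List (List Char)) (cur : List Char),
    (let st := ws.foldl
      (fun (st : List (List Char) × List Char) w =>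
        let segments := st.1
        let current := st.2
        let candidate := if current ≠ [] then current ++ [' '] ++ w else w
        if (candidate.length : Int) ≤ max_len then (segments, candidate)
        else ((if current ≠ [] then segments ++ [current] else segments), w))
      (segs, cur)
     if st.2 ≠ [] then st.1 ++ [st.2] else st.1)
    = segs ++ segA max_len ws cur := by
  induction ws with
  | nil =>
    intro segs cur
    by_cases hc : cur = [] <;> simp [segA, hc]
  | cons w ws ih =>
    intro segs cur
    simp only [List.foldl_cons, segA]
    by_cases hfit : (((if cur ≠ [] then cur ++ [' '] ++ w else w).length : Int) ≤ max_len)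
    · simp only [hfit, if_pos]
      exact ih segs _
    · simp only [hfit, if_neg, not_false_iff]
      rw [ih]
      by_cases hc : cur = [] <;> simp [hc]

-- pyGrow tracks exactly the length of the joined run
lemma pvGrowLen (max_len : Int) (ws : List (List Char)) :
    ∀ cur : List Char,
    (pyGrow max_len (cur.length : Int) ws).2
      = ((PySem.Chars.join [' '] (cur :: ws.take (pyGrow max_len (cur.length : Int) ws).1)).length : Int) := by
  induction ws with
  | nil => intro cur; simp [pyGrow, PySem.Chars.join_singleton]
  | cons w ws ih =>
    intro cur
    by_cases hfit : (cur.length : Int) + 1 + (w.length : Int) ≤ max_len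
    · have hlen : ((cur ++ [' '] ++ w).length : Int) = (cur.length : Int) + 1 + (w.length : Int) := by
        push_cast [List.length_append, List.length_cons]; simp
      have h1 : pyGrow max_len (cur.length : Int) (w :: ws)
          = ((pyGrow max_len ((cur.length : Int) + 1 + (w.length : Int)) ws).1 + 1,
             (pyGrow max_len ((cur.length : Int) + 1 + (w.length : Int)) ws).2) := by
        simp [pyGrow, hfit]
      rw [h1]
      have := ih (cur ++ [' '] ++ w)
      rw [hlen] at this
      rw [this]
      simp only [List.take_succ_cons, PySem.Chars.join_cons_cons]
      rw [← pvJoinGlue]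
    · simp [pyGrow, hfit, PySem.Chars.join_singleton]

-- unfolding pySegs at a nonempty first word, with the head rewritten through pvProc
lemma pvSegsCons (max_len : Int) (c : Char) (w : List Char) (ws : List (List Char)) :
    pySegs max_len ((c :: w) :: ws)
      = pvProc max_len (PySem.Chars.join [' '] ((c :: w) :: ws.take (pyGrow max_len (((c :: w).length : Int)) ws).1))
        ++ pySegs max_len (ws.drop (pyGrow max_len (((c :: w).length : Int)) ws).1) := by
  rw [pySegs]
  have := pvGrowLen max_len ws (c :: w)
  rw [pvProc]
  rw [this]

-- key invariant: A's recursive pass (post-processed by pvProc) equals B's break-point recursion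
lemma pvKey (max_len : Int) (ws : List (List Char)) :
    (∀ cur : List Char, cur ≠ [] →
      (segA max_len ws cur).flatMap (pvProc max_len)
        = pvProc max_len (PySem.Chars.join [' '] (cur :: ws.take (pyGrow max_len (cur.length : Int) ws).1))
          ++ pySegs max_len (ws.drop (pyGrow max_len (cur.length : Int) ws).1))
    ∧ (segA max_len ws []).flatMap (pvProc max_len) = pySegs max_len ws := by
  induction ws with
  | nil =>
    constructor
    · intro cur hc
      simp [segA, hc, pyGrow, PySem.Chars.join_singleton, pySegs]
    · simp [segA, pySegs]
  | cons w ws ih =>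
    have hstart : ∀ (v : List Char), v ≠ [] →
        (segA max_len ws v).flatMap (pvProc max_len) = pySegs max_len (v :: ws) := by
      intro v hv
      obtain ⟨c, w', rfl⟩ := List.exists_cons_of_ne_nil hv
      rw [ih.1 _ hv, pvSegsCons]
    constructor
    · intro cur hc
      simp only [segA, hc, ne_eq, not_false_iff, if_pos]
      by_cases hfit : (((cur ++ [' '] ++ w).length : Int) ≤ max_len)
      · have hlen : ((cur ++ [' '] ++ w).length : Int) = (cur.length : Int) + 1 + (w.length : Int) := by
          push_cast [List.length_append, List.length_cons]; simp
        rw [if_pos hfit]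
        have hcur' : cur ++ [' '] ++ w ≠ [] := by simp
        have h1 : pyGrow max_len (cur.length : Int) (w :: ws)
            = ((pyGrow max_len ((cur.length : Int) + 1 + (w.length : Int)) ws).1 + 1,
               (pyGrow max_len ((cur.length : Int) + 1 + (w.length : Int)) ws).2) := by
          simp [pyGrow, hlen ▸ hfit]
        rw [ih.1 _ hcur', h1, hlen]
        simp only [List.take_succ_cons, List.drop_succ_cons, PySem.Chars.join_cons_cons]
        rw [← pvJoinGlue]
      · rw [if_neg hfit]
        have h0 : pyGrow max_len (cur.length : Int) (w :: ws) = (0, (cur.length : Int)) := by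
          have : ¬ ((cur.length : Int) + 1 + (w.length : Int) ≤ max_len) := by
            intro h; apply hfit
            have hlen : ((cur ++ [' '] ++ w).length : Int) = (cur.length : Int) + 1 + (w.length : Int) := by
              push_cast [List.length_append, List.length_cons]; simp
            omega
          simp [pyGrow, this]
        rw [h0]
        simp only [List.take_zero, List.drop_zero, PySem.Chars.join_singleton]
        simp only [List.flatMap_append]
        simp only [List.flatMap_cons, List.flatMap_nil, List.append_nil]
        by_cases hw : w = []
        · subst hw
          rw [ih.2]
          have : pySegs max_len ([] :: ws) = pySegs max_len ws := by rw [pySegs]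
          rw [this]
        · rw [hstart w hw]
    · simp only [segA]
      by_cases hw : w = []
      · subst hw
        have hseg : pySegs max_len ([] :: ws) = pySegs max_len ws := by rw [pySegs]
        by_cases h0 : ((([] : List Char).length : Int) ≤ max_len)
        · simp only [ne_eq, not_true_eq_false, if_neg, not_false_iff]
          simp only [h0, if_pos]
          rw [ih.2, hseg]
        · simp only [ne_eq, not_true_eq_false, if_neg, not_false_iff]
          simp only [h0, if_false, List.nil_append]
          rw [ih.2, hseg]
      · simp only [ne_eq, not_true_eq_false, if_neg, not_false_iff]
        by_cases hfit : ((w.length : Int) ≤ max_len)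
        · rw [if_pos hfit]
          exact hstart w hw
        · rw [if_neg hfit]
          simp only [List.nil_append]
          exact hstart w hw

lemma pvMain (text : String) (max_len : Int) :
    force_break_long_py text max_len = force_break_long_py_alt text max_len := by
  unfold force_break_long_py force_break_long_py_alt
  by_cases hin : PySem.Chars.isIn [' '] text.toList = true
  · simp only [hin, if_pos, Bool.true_eq_false, if_neg, not_false_iff]
    have hfold := pvFoldA max_len (PySem.Chars.splitOn text.toList [' ']) [] []
    simp only [List.nil_append] at hfold
    rw [hfold, pvSecondPass, (pvKey max_len (PySem.Chars.splitOn text.toList [' '])).2]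
  · simp only [Bool.not_eq_true] at hin
    simp [hin]

-- ===== VERDICT (by name: the statement is the Claim_ definition above) =====
theorem force_break_long_py_spec : Claim_equal_force_break_long_py := by
  intro text max_len _ _
  unfold Spec_force_break_long_py
  exact pvMain text max_len
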